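-- pv_equiv track=rewrite | github.com/Jester-2-6/s-imply | src/ml/reconv_path_picker_new.py | select_representative_paths
-- ===== SOURCE A (Python) =====
-- from typing import Any, Dict, List, Optional, Set, Tuple, Union
--
-- def select_representative_paths(clusters: List[List[List[int]]]) -> List[List[int]]:
--     """Select representative path from each cluster."""
--     representatives = []
--
--     for cluster in clusters:
--         if not cluster:
--             continue
--
--         lengths = [len(path) for path in cluster]
--         median_idx = sorted(range(len(lengths)), key=lambda i: lengths[i])[len(lengths) // 2]
--         representatives.append(cluster[median_idx])
--
--     return representatives
-- ===== SOURCE B (Python) =====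
-- def select_representative_paths(clusters):
--     """Select representative path from each cluster by direct rank counting:
--     the median is the unique path whose (length, index) pair has exactly
--     m//2 lexicographically smaller pairs (the same element the stable sort picks)."""
--     representatives = []
--     for cluster in clusters:
--         m = len(cluster)
--         if m == 0:
--             continue
--         k = m // 2
--         lens = [len(p) for p in cluster]
--         for i in range(m):
--             rank = 0
--             for j in range(m):
--                 if lens[j] < lens[i] or (lens[j] == lens[i] and j < i):
--                     rank += 1
--             if rank == k:
--                 representatives.append(cluster[i])
--                 break
--     return representatives
-- ===== Notes on version B (the rewrite author's own statement) =====
-- stated objective: alternative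
-- what changed: Replaces A's stable sort of the index list (then picking position m//2) with a sort-free selection: for each cluster B directly finds the unique path whose (length, index) pair has exactly m//2 lexicographically smaller pairs, by rank counting.
import Mathlib
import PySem

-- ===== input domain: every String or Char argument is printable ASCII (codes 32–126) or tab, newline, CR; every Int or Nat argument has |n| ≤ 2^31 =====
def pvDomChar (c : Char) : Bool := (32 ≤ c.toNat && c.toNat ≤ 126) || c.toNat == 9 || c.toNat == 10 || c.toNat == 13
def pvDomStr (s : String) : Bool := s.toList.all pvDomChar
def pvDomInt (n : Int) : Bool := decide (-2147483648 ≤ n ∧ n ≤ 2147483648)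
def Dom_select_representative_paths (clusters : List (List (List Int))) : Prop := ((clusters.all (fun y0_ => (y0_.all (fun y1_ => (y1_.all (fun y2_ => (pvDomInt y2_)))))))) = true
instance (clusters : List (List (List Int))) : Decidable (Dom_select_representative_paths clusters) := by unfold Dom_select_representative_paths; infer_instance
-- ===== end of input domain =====

-- B replaces A's stable index sort (pick sorted[m//2]) by direct rank counting: the unique
-- path whose (length, index) pair has exactly m//2 lexicographically smaller pairs; same
-- return value, different algorithm (no sort).

-- ===== PORT A =====
def select_representative_paths (clusters : List (List (List Int))) : List (List Int) :=
  clusters.foldl (fun representatives cluster =>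
    if cluster = [] then representatives
    else
      let lengths : List Int := cluster.map (fun path => (path.length : Int))
      let median_idx : Int := PySem.List.pyGetD
          (PySem.List.sorted (PySem.List.pyRange 0 (lengths.length : Int) 1)
            (fun i => PySem.List.pyGetD lengths i 0) false)
          (PySem.Int.floordiv (lengths.length : Int) 2) 0
      representatives ++ [PySem.List.pyGetD cluster median_idx []]) []

-- ===== PORT B =====
def select_representative_paths_alt (clusters : List (List (List Int))) : List (List Int) :=
  clusters.foldl (fun representatives cluster =>
    if cluster.length = 0 then representatives
    else
      let k := cluster.length / 2
      let lens : List Int := cluster.map (fun p => (p.length : Int))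
      match (List.range cluster.length).find? (fun i =>
          decide ((List.range cluster.length).countP (fun j =>
            decide (lens.getD j 0 < lens.getD i 0 ∨ (lens.getD j 0 = lens.getD i 0 ∧ j < i))) = k)) with
      | some i => representatives ++ [cluster.getD i []]
      | none => representatives) []

-- ===== PRECONDITION & SPEC =====
def Spec_select_representative_paths (clusters : List (List (List Int))) (out : List (List Int)) : Prop := out = select_representative_paths_alt clusters
instance (clusters : List (List (List Int))) (out : List (List Int)) : Decidable (Spec_select_representative_paths clusters out) := by unfold Spec_select_representative_paths; infer_instance

-- ===== CLAIM (what is proved, stated in full; the proofs are below) =====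
def Claim_equal_select_representative_paths : Prop := ∀ (clusters : List (List (List Int))), Dom_select_representative_paths clusters → Spec_select_representative_paths clusters (select_representative_paths clusters)

-- ===== LEMMAS AND PROOFS =====

-- pointwise-equal comparators insert at the same place
theorem pv_insertBy_congr {α : Type} (b1 b2 : α → α → Bool) (x : α) (ys : List α)
    (h : ∀ y ∈ ys, b1 x y = b2 x y) :
    PySem.List.insertBy b1 x ys = PySem.List.insertBy b2 x ys := by
  induction ys with
  | nil => rfl
  | cons y ys ih =>
    simp only [PySem.List.insertBy]
    rw [h y (by simp)]
    split
    · rfl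
    · rw [ih (fun z hz => h z (by simp [hz]))]

-- lexicographic encoding: for 0 ≤ a,b < C, ka*C+a < kb*C+b iff (ka,a) <lex (kb,b)
theorem pv_key2_lt_iff (C a b ka kb : Int) (h0a : 0 ≤ a) (haC : a < C) (h0b : 0 ≤ b) (hbC : b < C) :
    (ka * C + a < kb * C + b ↔ (ka < kb ∨ (ka = kb ∧ a < b))) := by
  have hC : 0 ≤ C := le_trans h0a (le_of_lt haC)
  rcases lt_trichotomy ka kb with h | h | h
  · have h2 : (ka + 1) * C ≤ kb * C := mul_le_mul_of_nonneg_right (by omega) hC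
    have h3 : ka * C + C ≤ kb * C := by nlinarith
    constructor
    · intro _; exact Or.inl h
    · intro _; nlinarith
  · subst h
    constructor
    · intro hlt; exact Or.inr ⟨rfl, by omega⟩
    · rintro (hlt | ⟨_, hab⟩); · omega
      · omega
  · have h2 : (kb + 1) * C ≤ ka * C := mul_le_mul_of_nonneg_right (by omega) hC
    have h3 : kb * C + C ≤ ka * C := by nlinarith
    constructor
    · intro hlt; nlinarith
    · rintro (hlt | ⟨heq, _⟩); · omega
      · omega

-- the stable insertion sort by key equals the sort by the injective lex key
theorem pv_foldl_insert_key_eq_key2 (key : Int → Int) (C : Int) :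
    ∀ (xs acc : List Int), (∀ x ∈ xs, 0 ≤ x ∧ x < C) → (∀ y ∈ acc, 0 ≤ y ∧ y < C) →
    (∀ x ∈ xs, ∀ y ∈ acc, y < x) → xs.Pairwise (· < ·) →
    xs.foldl (fun a x => PySem.List.insertBy (fun a b => decide (key a < key b)) x a) acc
      = xs.foldl (fun a x => PySem.List.insertBy (fun a b => decide (key a * C + a < key b * C + b)) x a) acc := by
  intro xs
  induction xs with
  | nil => intro acc _ _ _ _; rfl
  | cons x xs ih =>
    intro acc hxs hacc hlt hpw
    simp only [List.foldl_cons]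
    have hx := hxs x (by simp)
    have hins : PySem.List.insertBy (fun a b => decide (key a < key b)) x acc
        = PySem.List.insertBy (fun a b => decide (key a * C + a < key b * C + b)) x acc := by
      apply pv_insertBy_congr
      intro y hy
      have hy' := hacc y hy
      have hyx := hlt x (by simp) y hy
      have := pv_key2_lt_iff C x y (key x) (key y) hx.1 hx.2 hy'.1 hy'.2
      simp only [decide_eq_decide]
      rw [this]
      constructor
      · intro h; exact Or.inl h
      · rintro (h | ⟨_, hxy⟩); · exact h
        · omega
    rw [hins]
    apply ih
    · intro z hz; exact hxs z (by simp [hz])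
    · intro y hy
      rw [PySem.List.mem_insertBy] at hy
      rcases hy with rfl | hy
      · exact hx
      · exact hacc y hy
    · intro z hz y hy
      rw [PySem.List.mem_insertBy] at hy
      rcases hy with rfl | hy
      · exact (List.pairwise_cons.mp hpw).1 z hz
      · exact hlt z (by simp [hz]) y hy
    · exact (List.pairwise_cons.mp hpw).2

-- in a strictly g-increasing list, the number of elements below T[p] is p
theorem pv_countP_lt_getElem (g : Int → Int) :
    ∀ (T : List Int), T.Pairwise (fun a b => g a < g b) →
    ∀ (p : Nat) (hp : p < T.length), T.countP (fun t => decide (g t < g T[p])) = p := by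
  intro T
  induction T with
  | nil => intro _ p hp; simp at hp
  | cons t rest ih =>
    intro hpw p hp
    have h1 : ∀ r ∈ rest, g t < g r := (List.pairwise_cons.mp hpw).1
    have h2 := (List.pairwise_cons.mp hpw).2
    cases p with
    | zero =>
      show List.countP (fun r => decide (g r < g t)) (t :: rest) = 0
      rw [List.countP_cons]
      have hz : rest.countP (fun r => decide (g r < g t)) = 0 := by
        apply List.countP_eq_zero.mpr
        intro r hr
        simp only [decide_eq_true_eq, not_lt]
        exact le_of_lt (h1 r hr)
      rw [hz]
      simp
    | succ p =>
      have hp' : p < rest.length := by simpa using hp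
      show List.countP (fun r => decide (g r < g rest[p])) (t :: rest) = p + 1
      rw [List.countP_cons, ih h2 p hp',
        decide_eq_true (h1 _ (List.getElem_mem hp'))]
      simp

-- find? of a uniquely satisfied predicate
theorem pv_find?_eq_some_of_unique {α : Type} (p : α → Bool) (xs : List α) (a : α)
    (hmem : a ∈ xs) (hpa : p a = true) (huniq : ∀ x ∈ xs, p x = true → x = a) :
    xs.find? p = some a := by
  induction xs with
  | nil => simp at hmem
  | cons x xs ih =>
    by_cases hx : p x = true
    · have : x = a := huniq x (by simp) hx
      subst this
      simp [List.find?, hx]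
    · have hxa : x ≠ a := fun h => hx (h ▸ hpa)
      have hmem' : a ∈ xs := by
        rcases List.mem_cons.mp hmem with h | h
        · exact absurd h.symm hxa
        · exact h
      rw [List.find?_cons_of_neg hx]
      exact ih hmem' (fun z hz hpz => huniq z (by simp [hz]) hpz)

-- per-cluster equality of the two step functions
theorem pv_step_eq (representatives : List (List Int)) (cluster : List (List Int)) :
    (if cluster = [] then representatives
     else
      let lengths : List Int := cluster.map (fun path => (path.length : Int))
      let median_idx : Int := PySem.List.pyGetD
          (PySem.List.sorted (PySem.List.pyRange 0 (lengths.length : Int) 1)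
            (fun i => PySem.List.pyGetD lengths i 0) false)
          (PySem.Int.floordiv (lengths.length : Int) 2) 0
      representatives ++ [PySem.List.pyGetD cluster median_idx []])
    =
    (if cluster.length = 0 then representatives
     else
      let k := cluster.length / 2
      let lens : List Int := cluster.map (fun p => (p.length : Int))
      match (List.range cluster.length).find? (fun i =>
          decide ((List.range cluster.length).countP (fun j =>
            decide (lens.getD j 0 < lens.getD i 0 ∨ (lens.getD j 0 = lens.getD i 0 ∧ j < i))) = k)) with
      | some i => representatives ++ [cluster.getD i []]
      | none => representatives) := by
  by_cases hc : cluster = []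
  · simp [hc]
  · have hm0 : cluster.length ≠ 0 := by simpa [List.length_eq_zero_iff] using hc
    rw [if_neg hc, if_neg hm0]
    dsimp only
    simp only [List.length_map]
    set lens : List Int := cluster.map (fun path => (path.length : Int)) with hlens
    set m : Nat := cluster.length with hm
    -- the stable sort by length equals the sort by the injective lex key
    have hS : PySem.List.sorted (PySem.List.pyRange 0 (m:Int) 1)
          (fun i => PySem.List.pyGetD lens i 0) false
        = PySem.List.sorted (PySem.List.pyRange 0 (m:Int) 1)
          (fun i => PySem.List.pyGetD lens i 0 * (m:Int) + i) false := by
      rw [PySem.List.sorted_eq_foldl_insertBy, PySem.List.sorted_eq_foldl_insertBy]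
      exact pv_foldl_insert_key_eq_key2 (fun i => PySem.List.pyGetD lens i 0) (m:Int)
        (PySem.List.pyRange 0 (m:Int) 1) []
        (fun x hx => PySem.List.mem_pyRange_one.mp hx)
        (by simp) (by simp) (PySem.List.pairwise_lt_pyRange_one 0 (m:Int))
    set T : List Int := PySem.List.sorted (PySem.List.pyRange 0 (m:Int) 1)
        (fun i => PySem.List.pyGetD lens i 0 * (m:Int) + i) false with hT
    have hTperm : T.Perm (PySem.List.pyRange 0 (m:Int) 1) := PySem.List.sorted_perm _ _ _
    have hTmem : ∀ t ∈ T, 0 ≤ t ∧ t < (m:Int) := by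
      intro t ht
      exact PySem.List.mem_pyRange_one.mp (hTperm.mem_iff.mp ht)
    have hTnodup : T.Nodup := hTperm.nodup_iff.mpr (PySem.List.nodup_pyRange_one 0 (m:Int))
    have hTlen : T.length = m := by
      rw [hT, PySem.List.length_sorted, PySem.List.length_pyRange_one]
      omega
    have hTpw : T.Pairwise (fun a b =>
        PySem.List.pyGetD lens a 0 * (m:Int) + a < PySem.List.pyGetD lens b 0 * (m:Int) + b) := by
      have hle := PySem.List.sorted_pairwise (PySem.List.pyRange 0 (m:Int) 1)
        (fun i => PySem.List.pyGetD lens i 0 * (m:Int) + i)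
      rw [← hT] at hle
      have hne : T.Pairwise (fun a b => a ≠ b) := hTnodup
      refine (hle.and hne).imp_of_mem ?_
      intro a b ha hb hab
      obtain ⟨hle', hne'⟩ := hab
      have hba := hTmem b hb
      have haa := hTmem a ha
      have h1 := pv_key2_lt_iff (m:Int) a b (PySem.List.pyGetD lens a 0) (PySem.List.pyGetD lens b 0)
        haa.1 haa.2 hba.1 hba.2
      have h2 := pv_key2_lt_iff (m:Int) b a (PySem.List.pyGetD lens b 0) (PySem.List.pyGetD lens a 0)
        hba.1 hba.2 haa.1 haa.2
      rw [h1]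
      have hnlt : ¬ (PySem.List.pyGetD lens b 0 * (m:Int) + b < PySem.List.pyGetD lens a 0 * (m:Int) + a) := not_lt.mpr hle'
      rw [h2] at hnlt
      push_neg at hnlt
      rcases lt_trichotomy (PySem.List.pyGetD lens a 0) (PySem.List.pyGetD lens b 0) with h | h | h
      · exact Or.inl h
      · refine Or.inr ⟨h, ?_⟩
        have h2' := hnlt.2 h.symm
        omega
      · exact absurd h (not_lt.mpr hnlt.1)
    have hk : m / 2 < m := Nat.div_lt_self (Nat.pos_of_ne_zero hm0) one_lt_two
    have hkT : m / 2 < T.length := by omega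
    have hflo : PySem.Int.floordiv ((m:Nat):Int) 2 = ((m / 2 : Nat) : Int) := by
      exact_mod_cast PySem.Int.floordiv_natCast m 2
    have hA : PySem.List.pyGetD T (PySem.Int.floordiv (m:Int) 2) 0 = T[m/2] := by
      rw [hflo, PySem.List.pyGetD_natCast, List.getD_eq_getElem T 0 hkT]
    set i0 : Int := T[m/2] with hi0def
    have hi0 : 0 ≤ i0 ∧ i0 < (m:Int) := hTmem _ (List.getElem_mem hkT)
    have hi0n : ((i0.toNat : Nat) : Int) = i0 := Int.toNat_of_nonneg hi0.1
    have hi0m : i0.toNat < m := by omega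
    have hR : PySem.List.pyRange 0 (m:Int) 1 = List.map (fun k : Nat => (k:Int)) (List.range m) := by
      have hmm : ((m:Int) - 0).toNat = m := by omega
      rw [PySem.List.pyRange_one, hmm]
      exact List.map_congr_left (fun a _ => by omega)
    have count_eq : ∀ i : Nat, i < m →
        (List.range m).countP (fun j =>
          decide (lens.getD j 0 < lens.getD i 0 ∨ (lens.getD j 0 = lens.getD i 0 ∧ j < i)))
        = T.countP (fun t => decide (PySem.List.pyGetD lens t 0 * (m:Int) + t
            < PySem.List.pyGetD lens (i:Int) 0 * (m:Int) + (i:Int))) := by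
      intro i hi
      rw [hTperm.countP_eq, hR]
      rw [List.countP_map]
      apply List.countP_congr
      intro j hj
      have hjm : j < m := List.mem_range.mp hj
      simp only [Function.comp_apply, decide_eq_true_eq, PySem.List.pyGetD_natCast]
      rw [pv_key2_lt_iff (m:Int) (j:Int) (i:Int) (lens.getD j 0) (lens.getD i 0)
        (by positivity) (by exact_mod_cast hjm) (by positivity) (by exact_mod_cast hi)]
      constructor
      · rintro (h | ⟨h, hji⟩)
        · exact Or.inl h
        · exact Or.inr ⟨h, by exact_mod_cast hji⟩
      · rintro (h | ⟨h, hji⟩)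
        · exact Or.inl h
        · exact Or.inr ⟨h, by exact_mod_cast hji⟩
    have pos_eq : ∀ i : Nat, i < m →
        (T.countP (fun t => decide (PySem.List.pyGetD lens t 0 * (m:Int) + t
            < PySem.List.pyGetD lens (i:Int) 0 * (m:Int) + (i:Int))) = m / 2 ↔ (i:Int) = i0) := by
      intro i hi
      have hmemT : (i:Int) ∈ T := hTperm.mem_iff.mpr
        (PySem.List.mem_pyRange_one.mpr ⟨by positivity, by exact_mod_cast hi⟩)
      obtain ⟨p, hp, hTp⟩ := List.getElem_of_mem hmemT
      constructor
      · intro hcnt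
        rw [← hTp] at hcnt
        rw [pv_countP_lt_getElem (fun t => PySem.List.pyGetD lens t 0 * (m:Int) + t) T hTpw p hp] at hcnt
        rw [← hTp, hi0def]
        subst hcnt
        rfl
      · intro heq
        rw [heq, hi0def]
        exact pv_countP_lt_getElem (fun t => PySem.List.pyGetD lens t 0 * (m:Int) + t) T hTpw _ hkT
    have hfind : (List.range m).find? (fun i =>
        decide ((List.range m).countP (fun j =>
          decide (lens.getD j 0 < lens.getD i 0 ∨ (lens.getD j 0 = lens.getD i 0 ∧ j < i))) = m / 2))
        = some i0.toNat := by
      apply pv_find?_eq_some_of_unique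
      · exact List.mem_range.mpr hi0m
      · apply decide_eq_true
        rw [count_eq i0.toNat hi0m]
        exact (pos_eq i0.toNat hi0m).mpr hi0n
      · intro x hx hpx
        have hxm : x < m := List.mem_range.mp hx
        have hcx := of_decide_eq_true hpx
        rw [count_eq x hxm] at hcx
        have := (pos_eq x hxm).mp hcx
        omega
    rw [hS, hfind, hA]
    have hgetA : PySem.List.pyGetD cluster i0 [] = cluster.getD i0.toNat [] :=
      PySem.List.pyGetD_of_nonneg cluster [] hi0.1
    rw [hgetA]

-- ===== VERDICT (by name: the statement is the Claim_ definition above) =====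
theorem select_representative_paths_spec : Claim_equal_select_representative_paths := by
  intro clusters _
  unfold Spec_select_representative_paths select_representative_paths select_representative_paths_alt
  apply List.foldl_ext
  intro acc cluster _
  exact pv_step_eq acc cluster
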